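-- pv_equiv track=rewrite | github.com/pypi-data/pypi-mirror-340 | packages/azureml-train-automl-runtime/azureml_train_automl_runtime-1.60.0-py3-none-any.whl/azureml/train/automl/runtime/_hts/proportions_calculation.py | _get_files_batches_sqrt
-- ===== SOURCE A (Python) =====
-- from typing import Any, Dict, Optional, List, cast
-- import math
--
-- def _get_files_batches_sqrt(files_list: List[str]) -> List[List[str]]:
--     """
--     Covert a list of files to a list of files batches which
--     contains approximately sqrt(total_files) in each batch.
--
--     :param files_list: A list of files.
--     :return: List[List[str]]
--     """
--     n_files = len(files_list)
--     n_batch = int(math.sqrt(n_files)) + 1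
--     files_batches = []
--     for i in range(n_batch):
--         if i * n_batch < n_files:
--             end_idx = n_files if (i + 1) * n_batch > n_files else (i + 1) * n_batch
--             files_batches.append(files_list[i * n_batch:end_idx])
--     return files_batches
-- ===== SOURCE B (Python) =====
-- from typing import List
-- import math
--
-- def _get_files_batches_sqrt(files_list: List[str]) -> List[List[str]]:
--     n_batch = int(math.sqrt(len(files_list))) + 1
--     batches = []
--     cur = []
--     for f in files_list:
--         cur.append(f)
--         if len(cur) == n_batch:
--             batches.append(cur)
--             cur = []
--     if cur:
--         batches.append(cur)
--     return batches
-- ===== Notes on version B (the rewrite author's own statement) =====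
-- stated objective: simpler
-- what changed: Replaces the range-over-batch-indices loop with guarded slicing by a single element-wise pass that accumulates a current batch and flushes it when it reaches n_batch, appending the trailing partial batch.
import Mathlib
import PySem

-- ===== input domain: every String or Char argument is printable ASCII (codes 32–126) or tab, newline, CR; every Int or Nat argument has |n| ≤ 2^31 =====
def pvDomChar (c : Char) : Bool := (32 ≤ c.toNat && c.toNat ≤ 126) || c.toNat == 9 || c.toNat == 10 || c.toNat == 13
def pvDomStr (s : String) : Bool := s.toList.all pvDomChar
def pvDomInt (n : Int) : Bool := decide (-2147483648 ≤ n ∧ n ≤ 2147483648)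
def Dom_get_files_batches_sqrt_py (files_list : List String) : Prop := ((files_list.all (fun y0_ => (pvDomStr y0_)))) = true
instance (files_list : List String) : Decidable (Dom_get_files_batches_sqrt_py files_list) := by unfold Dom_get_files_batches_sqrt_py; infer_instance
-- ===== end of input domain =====

-- B replaces A's loop over batch indices with guarded slicing by a single element-wise
-- pass that flushes the current batch when it reaches n_batch (objective: simpler).

-- ===== PORT A =====
-- int(math.sqrt(n)) is ported as Nat.sqrt n (exact since len(files_list) < 2^52).
def get_files_batches_sqrt_py (files_list : List String) : List (List String) :=
  let n_files : Int := files_list.length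
  let n_batch : Int := (Nat.sqrt files_list.length : Int) + 1
  (PySem.List.pyRange 0 n_batch).foldl
    (fun files_batches i =>
      if i * n_batch < n_files then
        let end_idx : Int := if (i + 1) * n_batch > n_files then n_files else (i + 1) * n_batch
        files_batches ++ [PySem.List.slice files_list (some (i * n_batch)) (some end_idx)]
      else files_batches) []

-- ===== PORT B =====
-- the body of B's for-loop, as a named helper
def pvStepB (n_batch : Int) (st : List (List String) × List String) (f : String) :
    List (List String) × List String :=
  let cur := st.2 ++ [f]
  if (cur.length : Int) = n_batch then (st.1 ++ [cur], ([] : List String)) else (st.1, cur)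

def get_files_batches_sqrt_py_alt (files_list : List String) : List (List String) :=
  let n_batch : Int := (Nat.sqrt files_list.length : Int) + 1
  let st := files_list.foldl (pvStepB n_batch) ([], [])
  if st.2.isEmpty then st.1 else st.1 ++ [st.2]

-- ===== PRECONDITION & SPEC =====
def Spec_get_files_batches_sqrt_py (files_list : List String) (out : List (List String)) : Prop := out = get_files_batches_sqrt_py_alt files_list
instance (files_list : List String) (out : List (List String)) : Decidable (Spec_get_files_batches_sqrt_py files_list out) := by unfold Spec_get_files_batches_sqrt_py; infer_instance

-- ===== CLAIM (what is proved, stated in full; the proofs are below) =====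
def Claim_equal_get_files_batches_sqrt_py : Prop := ∀ (files_list : List String), Dom_get_files_batches_sqrt_py files_list → Spec_get_files_batches_sqrt_py files_list (get_files_batches_sqrt_py files_list)

-- ===== LEMMAS AND PROOFS =====

-- Common specification: the list of consecutive chunks of size k.
def pvChunks (k : Nat) (l : List String) : List (List String) :=
  if h : l = [] ∨ k = 0 then [] else l.take k :: pvChunks k (l.drop k)
termination_by l.length
decreasing_by
  simp only [List.length_drop]
  rcases l with _ | ⟨a, t⟩
  · exact absurd (Or.inl rfl) (by assumption)
  · simp only [List.length_cons]; omega

lemma pvChunks_nil (k : Nat) : pvChunks k [] = [] := by rw [pvChunks]; simp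

lemma pvChunks_cons (k : Nat) (hk : k ≠ 0) (l : List String) (hl : l ≠ []) :
    pvChunks k l = l.take k :: pvChunks k (l.drop k) := by
  rw [pvChunks]; simp [hl, hk]

-- ===== B side =====

lemma b_loop (k : Nat) (hk : 0 < k) (l : List String) :
    ∀ (acc : List (List String)) (cur : List String), cur.length < k →
    (if (l.foldl (pvStepB ((k : Nat) : Int)) (acc, cur)).2.isEmpty then
        (l.foldl (pvStepB ((k : Nat) : Int)) (acc, cur)).1
      else
        (l.foldl (pvStepB ((k : Nat) : Int)) (acc, cur)).1 ++
          [(l.foldl (pvStepB ((k : Nat) : Int)) (acc, cur)).2])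
      = acc ++ pvChunks k (cur ++ l) := by
  induction l with
  | nil =>
    intro acc cur hcur
    rcases eq_or_ne cur [] with h | h
    · simp [h, pvChunks_nil]
    · simp only [List.foldl_nil, List.append_nil]
      rw [pvChunks_cons k (by omega) cur h]
      have htake : cur.take k = cur := List.take_of_length_le (by omega)
      have hdrop : cur.drop k = [] := List.drop_of_length_le (by omega)
      simp [h, htake, hdrop, pvChunks_nil, List.isEmpty_iff]
  | cons x xs ih =>
    intro acc cur hcur
    have hlen : (cur ++ [x]).length = cur.length + 1 := by simp
    simp only [List.foldl_cons, pvStepB]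
    by_cases hfull : (cur ++ [x]).length = k
    · have hcond : (((cur ++ [x]).length : Nat) : Int) = ((k : Nat) : Int) := by
        exact_mod_cast hfull
      rw [if_pos hcond]
      rw [ih (acc ++ [cur ++ [x]]) [] (by simpa using hk)]
      rw [pvChunks_cons k (by omega) (cur ++ x :: xs) (by simp)]
      have h1 : (cur ++ x :: xs) = (cur ++ [x]) ++ xs := by simp
      have htake : (cur ++ x :: xs).take k = cur ++ [x] := by
        rw [h1, List.take_append_of_le_length (le_of_eq hfull.symm),
          List.take_of_length_le (le_of_eq hfull)]
      have hdrop : (cur ++ x :: xs).drop k = xs := by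
        rw [h1, List.drop_append_of_le_length (le_of_eq hfull.symm),
          List.drop_of_length_le (le_of_eq hfull), List.nil_append]
      rw [htake, hdrop]
      simp
    · have hcond : ¬ ((((cur ++ [x]).length : Nat) : Int) = ((k : Nat) : Int)) := by
        intro h; exact hfull (by exact_mod_cast h)
      rw [if_neg hcond]
      rw [ih acc (cur ++ [x]) (by omega)]
      simp

-- ===== A side =====

-- The i-th chunk A's slice produces.
def pvNF (k : Nat) (l : List String) (i : Nat) : List String :=
  (l.drop (i * k)).take (min ((i + 1) * k) l.length - i * k)

lemma slice_eq_pvNF (k : Nat) (l : List String) (i : Nat) :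
    PySem.List.slice l (some ((i : Int) * (k : Int)))
      (some (if ((i : Int) + 1) * (k : Int) > (l.length : Int) then (l.length : Int) else ((i : Int) + 1) * (k : Int)))
      = pvNF k l i := by
  have hend : (if ((i : Int) + 1) * (k : Int) > (l.length : Int) then (l.length : Int) else ((i : Int) + 1) * (k : Int))
      = ((min ((i + 1) * k) l.length : Nat) : Int) := by
    split_ifs with h
    · have hx : (l.length : Int) < (((i + 1) * k : Nat) : Int) := by push_cast; linarith
      have : l.length ≤ (i + 1) * k := le_of_lt (by exact_mod_cast hx)
      simp [Nat.min_eq_right this]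
    · have hx : (((i + 1) * k : Nat) : Int) ≤ (l.length : Int) := by push_cast; linarith
      have : (i + 1) * k ≤ l.length := by exact_mod_cast hx
      simp [Nat.min_eq_left this]
  rw [hend]
  have hik : ((i : Int) * (k : Int)) = ((i * k : Nat) : Int) := by push_cast; ring
  rw [hik, PySem.List.slice_natCast]
  rfl

lemma filter_range_eq (k n : Nat) (hk : 0 < k) (m : Nat) :
    (List.range m).filter (fun i => decide (i * k < n)) = List.range (min m ((n + k - 1) / k)) := by
  induction m with
  | zero => simp
  | succ m ih =>
    rw [List.range_succ, List.filter_append, ih]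
    have hdiv := Nat.div_add_mod (n + k - 1) k
    have hmod := Nat.mod_lt (n + k - 1) hk
    by_cases h : m * k < n
    · have hm : m < (n + k - 1) / k := by
        by_contra hc
        push_neg at hc
        have h1 : k * ((n + k - 1) / k) ≤ k * m := mul_le_mul_left' hc k
        have h2 : k * m = m * k := Nat.mul_comm k m
        omega
      simp only [List.filter_cons, List.filter_nil, h, decide_true, if_true]
      rw [Nat.min_eq_left (by omega), Nat.min_eq_left (by omega), List.range_succ]
    · have hm : (n + k - 1) / k ≤ m := by
        by_contra hc
        push_neg at hc
        have h1 : k * (m + 1) ≤ k * ((n + k - 1) / k) := Nat.mul_le_mul_left k hc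
        have h2 : k * (m + 1) = m * k + k := by ring
        omega
      simp only [List.filter_cons, List.filter_nil, h, decide_false]
      rw [Nat.min_eq_right (by omega), Nat.min_eq_right (by omega)]
      simp

lemma map_pvNF_eq_chunks (k : Nat) (hk : 0 < k) :
    ∀ (n : Nat) (l : List String), l.length ≤ n →
    (List.range ((l.length + k - 1) / k)).map (pvNF k l) = pvChunks k l := by
  intro n
  induction n with
  | zero =>
    intro l hl
    have h0 : l = [] := List.eq_nil_of_length_eq_zero (by omega)
    subst h0
    have hz : ((([] : List String).length + k - 1) / k) = 0 := Nat.div_eq_of_lt (by simp; omega)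
    rw [hz, pvChunks_nil]
    simp
  | succ n ih =>
    intro l hl
    rcases eq_or_ne l [] with h | h
    · subst h
      have hz : ((([] : List String).length + k - 1) / k) = 0 := Nat.div_eq_of_lt (by simp; omega)
      rw [hz, pvChunks_nil]
      simp
    · have hN : 0 < l.length := List.length_pos_of_ne_nil h
      have hc : (l.length + k - 1) / k = (l.length - 1) / k + 1 := by
        have he : l.length + k - 1 = (l.length - 1) + k := by omega
        rw [he, Nat.add_div_right _ hk]
      rw [hc, List.range_succ_eq_map, List.map_cons, List.map_map]
      rw [pvChunks_cons k (by omega) l h]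
      congr 1
      · unfold pvNF
        simp only [Nat.zero_mul, List.drop_zero, Nat.sub_zero, Nat.zero_add, Nat.one_mul]
        rcases le_total k l.length with hkN | hkN
        · rw [Nat.min_eq_left hkN]
        · rw [Nat.min_eq_right hkN, List.take_length, List.take_of_length_le hkN]
      · rcases le_or_gt k l.length with hkN | hkN
        · have hlen : (l.drop k).length = l.length - k := by simp
          have hc2 : ((l.drop k).length + k - 1) / k = (l.length - 1) / k := by
            rw [hlen]
            congr 1
            omega
          rw [← ih (l.drop k) (by rw [hlen]; omega), hc2]
          apply List.map_congr_left
          intro i _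
          simp only [Function.comp_apply, Nat.succ_eq_add_one]
          unfold pvNF
          rw [List.drop_drop, hlen]
          have e1 : (i + 1) * k = i * k + k := by ring
          have e2 : (i + 1 + 1) * k = i * k + k + k := by ring
          have e3 : k + i * k = i * k + k := by ring
          rw [e1, e2, e3]
          congr 1
          generalize i * k = a
          omega
        · have hd : l.drop k = [] := List.drop_of_length_le (le_of_lt hkN)
          have hz : (l.length - 1) / k = 0 := Nat.div_eq_of_lt (by omega)
          rw [hz, hd, pvChunks_nil]
          simp

lemma a_eq_chunks (l : List String) :
    get_files_batches_sqrt_py l = pvChunks (Nat.sqrt l.length + 1) l := by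
  unfold get_files_batches_sqrt_py
  have hcast : ((Nat.sqrt l.length : Int) + 1) = ((Nat.sqrt l.length + 1 : Nat) : Int) := by
    push_cast; ring
  simp only [hcast]
  set K : Nat := Nat.sqrt l.length + 1 with hK
  rw [PySem.List.pyRange_zero_natCast, List.foldl_map]
  simp only [slice_eq_pvNF]
  simp only [← Nat.cast_mul, Nat.cast_lt]
  have hbool : (fun (acc : List (List String)) (i : Nat) =>
        if i * K < l.length then acc ++ [pvNF K l i] else acc)
      = (fun acc i => if (fun i => decide (i * K < l.length)) i = true then
          acc ++ [pvNF K l i] else acc) := by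
    funext acc i
    simp only [decide_eq_true_eq]
  rw [hbool, PySem.List.foldl_append_if, List.nil_append,
    filter_range_eq K l.length (by omega) K]
  have hlt : l.length < K * K := by
    simpa [hK, Nat.succ_eq_add_one] using Nat.lt_succ_sqrt l.length
  have hdiv : (l.length + K - 1) / K < K + 1 := by
    rw [Nat.div_lt_iff_lt_mul (by omega)]
    calc l.length + K - 1 < l.length + K := by omega
      _ ≤ K * K + K := by linarith
      _ = (K + 1) * K := by ring
  rw [Nat.min_eq_right (by omega)]
  exact map_pvNF_eq_chunks K (by omega) l.length l le_rfl

lemma b_eq_chunks (l : List String) :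
    get_files_batches_sqrt_py_alt l = pvChunks (Nat.sqrt l.length + 1) l := by
  unfold get_files_batches_sqrt_py_alt
  set K : Nat := Nat.sqrt l.length + 1 with hK
  have hcast : ((Nat.sqrt l.length : Int) + 1) = ((K : Nat) : Int) := by push_cast [hK]; ring
  simp only [hcast]
  have := b_loop K (by omega) l [] [] (by simp [hK])
  simpa using this

-- ===== VERDICT (by name: the statement is the Claim_ definition above) =====
theorem get_files_batches_sqrt_py_spec : Claim_equal_get_files_batches_sqrt_py := by
  intro l _
  unfold Spec_get_files_batches_sqrt_py
  rw [a_eq_chunks, b_eq_chunks]
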